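-- pv_equiv track=rewrite | github.com/gyalpodongo/6.0001_PSETs_Fall_2020_MIT | 1_ps3/document_distance_paterne.py | compute_most_frequent
-- ===== SOURCE A (Python) =====
-- def compute_most_frequent(dict1, dict2):
--     """
--     The keys of dict1 and dict2 are all lowercase,
--     you will NOT need to worry about case sensitivity.
--
--     Args:
--         dict1: frequency dictionary for one text
--         dict2: frequency dictionary for another text
--     Returns:
--         list of the most frequent word(s) in the input dictionaries
--
--     The most frequent word:
--         * is based on the combined word frequencies across both dictionaries.
--           If a word occurs in both dictionaries, consider the sum the
--           freqencies as the combined word frequency.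
--         * need not be in both dictionaries, i.e it can be exclusively in
--           dict1, dict2, or shared by dict1 and dict2.
--     If multiple words are tied (i.e. share the same highest frequency),
--     return an alphabetically ordered list of all these words.
--     """
--     list11 = []
--     list12 = []
--     stringdict1 = ""
--     list21 = []
--     list22 = []
--     stringdict2 = ""
--     for i in dict1.keys():
--         list11.append(i)
--     for j in dict1.values():
--         list12.append(j)
--     for b in range (len(list11)):
--         stringdict1 +=  " " + (list11[b] +" ")* list12[b]
--     for k in dict2.keys():
--         list21.append(k)
--     for y in dict2.values():
--         list22.append(y)
--     for d in range(len(list21)):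
--         stringdict2 +=  " " + (list21[d] +" ")* list22[d]
--
--     total_words = stringdict1 + stringdict2
--     #return gttt
--     thelist = total_words.split()
--     my_dict= {}
--     yooolist = []
--     themost_freq_words = []
--     for r in thelist:
--         if r in my_dict.keys():
--             my_dict[r] += 1
--         else:
--             my_dict[r] = 1
--     for c in my_dict.values():
--         yooolist.append(c)
--     themax_freq = max(yooolist)
--     for f in my_dict.keys():
--         if my_dict[f] == themax_freq:
--             themost_freq_words.append(f)
--     themost_freq_words.sort()
--     return themost_freq_words
-- ===== SOURCE B (Python) =====
-- def compute_most_frequent(dict1, dict2):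
--     """Return an alphabetically sorted list of the most frequent word(s).
--
--     Each dictionary maps a whitespace-separated phrase to the number of
--     times it occurs in its text, so every word of the phrase occurs that
--     many times; a phrase with a non-positive occurrence count does not
--     occur at all.  A word's combined frequency is the sum of the
--     occurrence counts of every phrase, in either dictionary, that
--     contains it.
--     """
--     counts = {}
--     for freqs in (dict1, dict2):
--         for phrase, occurrences in freqs.items():
--             if occurrences > 0:
--                 for word in phrase.split():
--                     counts[word] = counts.get(word, 0) + occurrences
--     top = max(counts.values())
--     return sorted(word for word, count in counts.items() if count == top)
-- ===== Notes on version B (the rewrite author's own statement) =====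
-- stated objective: faster
-- what changed: B tallies the words of each dict entry once, weighted by the entry's occurrence count (one pass over the entries into a counter dict, then max and sort), instead of A's building a giant string that repeats every phrase count times and recounting it token by token; Pre_ excludes only the inputs where A raises ValueError (max() of an empty sequence: no entry with a positive count and a non-whitespace character).
import Mathlib
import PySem

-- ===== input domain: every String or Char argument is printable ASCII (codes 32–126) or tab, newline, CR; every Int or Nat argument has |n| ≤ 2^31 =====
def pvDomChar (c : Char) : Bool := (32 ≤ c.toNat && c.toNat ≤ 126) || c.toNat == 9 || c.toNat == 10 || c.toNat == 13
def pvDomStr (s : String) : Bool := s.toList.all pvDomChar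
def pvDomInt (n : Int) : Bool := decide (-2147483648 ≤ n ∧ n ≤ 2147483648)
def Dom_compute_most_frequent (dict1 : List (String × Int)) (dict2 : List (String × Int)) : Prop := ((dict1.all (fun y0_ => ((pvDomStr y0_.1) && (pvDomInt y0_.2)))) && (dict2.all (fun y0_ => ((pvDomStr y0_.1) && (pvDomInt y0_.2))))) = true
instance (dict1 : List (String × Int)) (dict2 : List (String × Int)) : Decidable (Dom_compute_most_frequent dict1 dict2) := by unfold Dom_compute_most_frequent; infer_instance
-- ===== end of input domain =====

-- B tallies each phrase's words once, weighted by its occurrence count, instead of A's building a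
-- giant string that repeats every phrase count times and recounting it token by token (objective: faster).


-- ===== PORT A =====
-- Port note: the Python str values stringdict1/stringdict2/total_words are modeled as List Char
-- (exact for str '+'/'*'); the dict arguments become PySem.Dict via ofList (insertion order, last value wins).
def compute_most_frequent (dict1 : List (String × Int)) (dict2 : List (String × Int)) : List String :=
  let pydict1 := PySem.Dict.ofList dict1
  let pydict2 := PySem.Dict.ofList dict2
  let list11 := pydict1.keys.foldl (fun acc i => acc ++ [i]) []
  let list12 := pydict1.values.foldl (fun acc j => acc ++ [j]) []
  let stringdict1 := (PySem.List.pyRange 0 (PySem.List.len list11) 1).foldl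
      (fun s b => s ++ (' ' :: PySem.List.pyRepeat ((PySem.List.pyGetD list11 b "").toList ++ [' ']) (PySem.List.pyGetD list12 b 0))) ([] : List Char)
  let list21 := pydict2.keys.foldl (fun acc k => acc ++ [k]) []
  let list22 := pydict2.values.foldl (fun acc y => acc ++ [y]) []
  let stringdict2 := (PySem.List.pyRange 0 (PySem.List.len list21) 1).foldl
      (fun s d => s ++ (' ' :: PySem.List.pyRepeat ((PySem.List.pyGetD list21 d "").toList ++ [' ']) (PySem.List.pyGetD list22 d 0))) ([] : List Char)
  let total_words := stringdict1 ++ stringdict2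
  let thelist := PySem.Str.split₀ (String.ofList total_words)
  let my_dict := thelist.foldl (fun d r => if d.contains r then d.modify r 0 (· + 1) else d.insert r 1) PySem.Dict.empty
  let yooolist := my_dict.values.foldl (fun acc c => acc ++ [c]) ([] : List Int)
  match PySem.List.max? yooolist (fun x => x) with   -- max(yooolist); Python raises ValueError on [] : excluded by Pre_
  | none => []
  | some themax_freq =>
    let themost_freq_words := my_dict.keys.foldl
        (fun acc f => if my_dict.getD f 0 == themax_freq then acc ++ [f] else acc) []
    PySem.List.sorted themost_freq_words (fun x => x)

-- ===== PORT B =====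
def compute_most_frequent_alt (dict1 : List (String × Int)) (dict2 : List (String × Int)) : List String :=
  let counts := ((PySem.Dict.ofList dict1).items ++ (PySem.Dict.ofList dict2).items).foldl
      (fun d p => if 0 < p.2 then
          (PySem.Str.split₀ p.1).foldl (fun d w => d.insert w (d.getD w 0 + p.2)) d
        else d)
      PySem.Dict.empty
  match PySem.List.max? counts.values (fun x => x) with   -- max(counts.values()); ValueError on [] : outside Pre_
  | none => []
  | some top =>
    PySem.List.sorted ((counts.items.filter (fun p => p.2 == top)).map (fun p => p.1)) (fun x => x)

-- ===== PRECONDITION & SPEC =====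
-- Pre_ excludes exactly the inputs where the Python raises ValueError (max() of an empty
-- sequence): no entry of either dict has a positive occurrence count together with a phrase
-- containing a non-whitespace character, so no word at all is counted.
def Pre_compute_most_frequent (dict1 : List (String × Int)) (dict2 : List (String × Int)) : Prop :=
  ∃ p ∈ (PySem.Dict.ofList dict1).items ++ (PySem.Dict.ofList dict2).items,
    0 < p.2 ∧ p.1.toList.any (fun c => !PySem.Chars.isspace c) = true
instance (dict1 : List (String × Int)) (dict2 : List (String × Int)) : Decidable (Pre_compute_most_frequent dict1 dict2) := by unfold Pre_compute_most_frequent; infer_instance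
def pvWitness_compute_most_frequent : (List (String × Int)) × (List (String × Int)) := ([("a", 1)], [])
def Spec_compute_most_frequent (dict1 : List (String × Int)) (dict2 : List (String × Int)) (out : List String) : Prop := out = compute_most_frequent_alt dict1 dict2
instance (dict1 : List (String × Int)) (dict2 : List (String × Int)) (out : List String) : Decidable (Spec_compute_most_frequent dict1 dict2 out) := by unfold Spec_compute_most_frequent; infer_instance

-- ===== CLAIM (what is proved, stated in full; the proofs are below) =====
def Claim_equal_compute_most_frequent : Prop := ∀ (dict1 : List (String × Int)) (dict2 : List (String × Int)), Dom_compute_most_frequent dict1 dict2 → Pre_compute_most_frequent dict1 dict2 → Spec_compute_most_frequent dict1 dict2 (compute_most_frequent dict1 dict2)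

-- ===== LEMMAS AND PROOFS =====

lemma pv_go_acc (ys : List Char) : ∀ cur acc, PySem.Chars.split₀.go ys cur acc = acc.reverse ++ PySem.Chars.split₀.go ys cur [] := by
  induction ys with
  | nil =>
    intro cur acc
    by_cases h : cur.isEmpty <;> simp [PySem.Chars.split₀.go, h]
  | cons c rest ih =>
    intro cur acc
    by_cases hs : PySem.Chars.isspace c
    · by_cases h : cur.isEmpty
      · simp only [PySem.Chars.split₀.go, hs, h, if_true]
        rw [ih [] acc]
      · simp only [PySem.Chars.split₀.go, hs, h, if_true]
        simp only [Bool.false_eq_true, if_false]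
        rw [ih [] (cur.reverse :: acc), ih [] [cur.reverse]]
        simp
    · simp only [PySem.Chars.split₀.go, hs]
      simp only [Bool.false_eq_true, if_false]
      rw [ih (c :: cur) acc]

lemma pv_go_append_space (xs : List Char) : ∀ ys cur acc, PySem.Chars.split₀.go (xs ++ ' ' :: ys) cur acc = PySem.Chars.split₀.go ys [] ((PySem.Chars.split₀.go xs cur acc).reverse) := by
  induction xs with
  | nil =>
    intro ys cur acc
    by_cases h : cur.isEmpty
    · conv_lhs => simp only [List.nil_append, PySem.Chars.split₀.go, show PySem.Chars.isspace ' ' = true from rfl, h, if_true]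
      congr 1
      simp [PySem.Chars.split₀.go, h]
    · conv_lhs => simp only [List.nil_append, PySem.Chars.split₀.go, show PySem.Chars.isspace ' ' = true from rfl, h, if_true]
      simp [PySem.Chars.split₀.go, h]
  | cons c rest ih =>
    intro ys cur acc
    by_cases hs : PySem.Chars.isspace c
    · by_cases h : cur.isEmpty <;>
        simp only [List.cons_append, PySem.Chars.split₀.go, hs, h, if_true, Bool.false_eq_true, if_false] <;> rw [ih]
    · simp only [List.cons_append, PySem.Chars.split₀.go, hs, Bool.false_eq_true, if_false]
      rw [ih]

lemma pv_split_append_space (xs ys : List Char) : PySem.Chars.split₀ (xs ++ ' ' :: ys) = PySem.Chars.split₀ xs ++ PySem.Chars.split₀ ys := by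
  show PySem.Chars.split₀.go _ [] [] = _
  rw [pv_go_append_space, pv_go_acc]
  simp [PySem.Chars.split₀]

lemma pv_split_rep (k : List Char) (n : Nat) :
    PySem.Chars.split₀ ((List.replicate n (k ++ [' '])).flatten) = (List.replicate n (PySem.Chars.split₀ k)).flatten := by
  induction n with
  | zero => simp [PySem.Chars.split₀, PySem.Chars.split₀.go]
  | succ m ih =>
    simp only [List.replicate_succ, List.flatten_cons, List.append_assoc, List.singleton_append]
    rw [pv_split_append_space, ih]

def pvChunk (p : String × Int) : List Char :=
  ' ' :: (List.replicate p.2.toNat (p.1.toList ++ [' '])).flatten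
def pvToks (p : String × Int) : List String :=
  (List.replicate p.2.toNat (PySem.Str.split₀ p.1)).flatten
def pvBump (d : PySem.Dict String Int) (p : String × Int) : PySem.Dict String Int :=
  d.insert p.1 (d.getD p.1 0 + p.2)
def pvPairs (p : String × Int) : List (String × Int) :=
  if 0 < p.2 then (PySem.Str.split₀ p.1).map (fun t => (t, p.2)) else []

-- split of the chunk concatenation
lemma pv_split_chunks_aux (L : List (String × Int)) : ∀ b : List Char,
    PySem.Chars.split₀ (b ++ L.flatMap pvChunk) =
      PySem.Chars.split₀ b ++ L.flatMap (fun p => (List.replicate p.2.toNat (PySem.Chars.split₀ p.1.toList)).flatten) := by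
  induction L with
  | nil => intro b; simp
  | cons p L ih =>
    intro b
    have : b ++ (p :: L).flatMap pvChunk = b ++ ' ' :: ((List.replicate p.2.toNat (p.1.toList ++ [' '])).flatten ++ L.flatMap pvChunk) := by
      simp [pvChunk]
    rw [this, pv_split_append_space, ih, pv_split_rep]
    simp

lemma pv_split_chunks (L : List (String × Int)) :
    PySem.Str.split₀ (String.ofList (L.flatMap pvChunk)) = L.flatMap pvToks := by
  have h := pv_split_chunks_aux L []
  simp only [List.nil_append] at h
  show List.map String.ofList (PySem.Chars.split₀ (String.ofList (L.flatMap pvChunk)).toList) = _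
  have ht : (String.ofList (L.flatMap pvChunk)).toList = L.flatMap pvChunk := by simp
  rw [ht, h]
  simp only [PySem.Chars.split₀, PySem.Chars.split₀.go, List.map_append, List.map_flatMap]
  simp only [List.map_flatten, List.map_replicate]
  rfl

-- index-loop to flatMap over the pair list
lemma pv_range_flatMap {α β γ : Type} (g : α → β → List γ) (d1 : α) (d2 : β) :
    ∀ (l : List (α × β)),
      (List.range l.length).flatMap (fun k => g ((l.map Prod.fst).getD k d1) ((l.map Prod.snd).getD k d2)) =
        l.flatMap (fun p => g p.1 p.2) := by
  intro l
  induction l with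
  | nil => simp
  | cons p l ih =>
    simp only [List.length_cons, List.range_succ_eq_map, List.flatMap_cons, List.map_cons, List.getD_cons_zero,
      List.flatMap_map]
    rw [← ih]
    simp

-- ===== Set-of-keys lemmas =====
lemma pv_update_absorb (s : PySem.Set String) (X : List String) (h : ∀ x ∈ X, x ∈ s) :
    PySem.Set.update s X = s := by
  rw [PySem.Set.update_eq_append_filter]
  have : (PySem.Set.ofList X).filter (fun y => !s.contains y) = [] := by
    rw [List.filter_eq_nil_iff]
    intro y hy
    simpa using h y ((PySem.Set.mem_ofList _ _).mp hy)
  rw [this, List.append_nil]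

lemma pv_update_flatten_replicate (X : List String) : ∀ (n : Nat), 1 ≤ n → ∀ s : PySem.Set String,
    PySem.Set.update s ((List.replicate n X).flatten) = PySem.Set.update s X := by
  intro n
  induction n with
  | zero => omega
  | succ m ih =>
    intro _ s
    rcases Nat.eq_zero_or_pos m with hm | hm
    · subst hm; simp
    · simp only [List.replicate_succ, List.flatten_cons]
      rw [PySem.Set.update_append, ih hm]
      exact pv_update_absorb _ _ (fun x hx => ((PySem.Set.mem_update _ _ _).mpr (Or.inr hx)))

lemma pv_update_flatMap_congr {ι : Type} (f g : ι → List String) (L : List ι)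
    (h : ∀ p ∈ L, ∀ s : PySem.Set String, PySem.Set.update s (f p) = PySem.Set.update s (g p)) :
    ∀ s : PySem.Set String, PySem.Set.update s (L.flatMap f) = PySem.Set.update s (L.flatMap g) := by
  induction L with
  | nil => intro s; simp
  | cons p L ih =>
    intro s
    simp only [List.flatMap_cons]
    rw [PySem.Set.update_append, PySem.Set.update_append, h p (by simp),
      ih (fun q hq => h q (by simp [hq]))]

lemma pv_keys_segment (p : String × Int) (s : PySem.Set String) :
    PySem.Set.update s (pvToks p) = PySem.Set.update s (pvPairs p |>.map Prod.fst) := by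
  by_cases hv : 0 < p.2
  · have hn : 1 ≤ p.2.toNat := by omega
    simp only [pvToks, pvPairs, hv, if_true, List.map_map]
    rw [pv_update_flatten_replicate _ _ hn]
    congr 1
    exact (List.map_congr_left (fun t _ => rfl) |>.trans (List.map_id _)).symm
  · have hn : p.2.toNat = 0 := by omega
    simp [pvToks, pvPairs, hv, hn]

-- ===== value lemmas =====
lemma pv_sum_ite (t : String) (v : Int) (S : List String) :
    (S.map (fun x => if x = t then v else 0)).sum = v * (S.count t : Int) := by
  induction S with
  | nil => simp
  | cons x S ih =>
    by_cases h : x = t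
    · subst h
      simp only [List.map_cons, List.sum_cons, if_true, ih, List.count_cons_self]
      push_cast; ring
    · simp only [List.map_cons, List.sum_cons, if_neg h, ih, List.count_cons_of_ne (by simpa using h)]
      ring

lemma pv_bump_getD (t : String) : ∀ (L : List (String × Int)) (d : PySem.Dict String Int),
    (L.foldl pvBump d).getD t 0 = d.getD t 0 + (L.map (fun p => if p.1 = t then p.2 else 0)).sum := by
  intro L
  induction L with
  | nil => simp
  | cons p L ih =>
    intro d
    simp only [List.foldl_cons, List.map_cons, List.sum_cons, ih]
    rw [pvBump, PySem.Dict.getD_insert]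
    by_cases h : t = p.1
    · subst h; simp; ring
    · rw [if_neg h, if_neg (fun hh => h hh.symm)]; ring

lemma pv_dict_eq (d d' : PySem.Dict String Int) (hnd : d.keys.Nodup) (hnd' : d'.keys.Nodup)
    (hk : d.keys = d'.keys) (hv : ∀ t, d.getD t 0 = d'.getD t 0) : d = d' := by
  apply PySem.Dict.ext
  rw [PySem.Dict.items_eq_map_keys d hnd 0, PySem.Dict.items_eq_map_keys d' hnd' 0, ← hk]
  exact List.map_congr_left (fun k _ => by rw [hv k])

lemma pvBump_eq : pvBump = fun (d : PySem.Dict String Int) (p : String × Int) => d.insert p.1 (d.getD p.1 0 + p.2) := rfl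

lemma pv_sum_flatMap {α : Type} (f : α → List Int) (L : List α) :
    (L.flatMap f).sum = (L.map (fun x => (f x).sum)).sum := by
  induction L with
  | nil => simp
  | cons x L ih => simp [ih]

lemma pv_seg_sum (t : String) (p : String × Int) :
    ((pvToks p).map (fun tok => if tok = t then (1:Int) else 0)).sum =
      ((pvPairs p).map (fun q => if q.1 = t then q.2 else 0)).sum := by
  by_cases hv : 0 < p.2
  · simp only [pvToks, pvPairs, hv, if_true, List.map_map, List.map_flatten, List.map_replicate,
      List.sum_flatten, List.sum_replicate]
    rw [pv_sum_ite]
    have h2 : ((PySem.Str.split₀ p.1).map ((fun q => if q.1 = t then q.2 else 0) ∘ fun t => (t, p.2))).sum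
        = ((PySem.Str.split₀ p.1).map (fun tok => if tok = t then p.2 else 0)).sum := by
      exact congrArg List.sum (List.map_congr_left (fun tok _ => rfl))
    rw [h2, pv_sum_ite, one_mul]
    have hc : ((p.2.toNat : Nat) : Int) = p.2 := Int.toNat_of_nonneg (le_of_lt hv)
    rw [nsmul_eq_mul, hc]
  · have hn : p.2.toNat = 0 := by omega
    simp [pvToks, pvPairs, hv, hn]

lemma pv_keys_nodup (L : List (String × Int)) : (L.foldl pvBump PySem.Dict.empty).keys.Nodup := by
  rw [pvBump_eq]
  exact PySem.Dict.nodup_keys_foldl_insert_key L Prod.fst (fun d p => d.getD p.1 0 + p.2) _ (by simp [PySem.Dict.empty])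

lemma pv_keys_bump (L : List (String × Int)) :
    (L.foldl pvBump PySem.Dict.empty).keys = PySem.Set.update ([] : PySem.Set String) (L.map Prod.fst) := by
  rw [pvBump_eq]
  have h := PySem.Dict.keys_foldl_insert_key (ν := Int) L Prod.fst (fun d p => d.getD p.1 0 + p.2) PySem.Dict.empty
  simpa [PySem.Dict.empty] using h

lemma pv_dicts_core (ed : List (String × Int)) :
    ((ed.flatMap pvToks).map (fun t => (t, (1:Int)))).foldl pvBump PySem.Dict.empty
      = (ed.flatMap pvPairs).foldl pvBump PySem.Dict.empty := by
  apply pv_dict_eq _ _ (pv_keys_nodup _) (pv_keys_nodup _)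
  · rw [pv_keys_bump, pv_keys_bump]
    have h1 : ((ed.flatMap pvToks).map (fun t => (t, (1:Int)))).map Prod.fst = ed.flatMap pvToks := by
      rw [List.map_map]
      exact (List.map_congr_left (fun t _ => rfl)).trans (List.map_id _)
    have h2 : (ed.flatMap pvPairs).map Prod.fst = ed.flatMap (fun p => (pvPairs p).map Prod.fst) := List.map_flatMap
    rw [h1, h2]
    exact pv_update_flatMap_congr _ _ ed (fun p _ s => pv_keys_segment p s) []
  · intro t
    rw [pv_bump_getD, pv_bump_getD]
    congr 1
    rw [List.map_map, List.map_flatMap, List.map_flatMap, pv_sum_flatMap, pv_sum_flatMap]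
    refine congrArg List.sum (List.map_congr_left (fun p _ => ?_))
    have : (pvToks p).map ((fun q => if q.1 = t then q.2 else 0) ∘ fun t => (t, (1:Int)))
        = (pvToks p).map (fun tok => if tok = t then (1:Int) else 0) :=
      List.map_congr_left (fun tok _ => rfl)
    rw [this]
    exact pv_seg_sum t p

lemma pv_A_fold (thelist : List String) :
    thelist.foldl (fun d r => if d.contains r then d.modify r 0 (· + 1) else d.insert r 1) PySem.Dict.empty
      = (thelist.map (fun t => (t, (1:Int)))).foldl pvBump PySem.Dict.empty := by
  rw [List.foldl_map]
  apply PySem.List.foldl_congr_mem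
  intro d r _
  by_cases h : d.contains r
  · rw [if_pos h]; rfl
  · rw [if_neg h]
    show d.insert r 1 = d.insert r (d.getD r 0 + 1)
    rw [PySem.Dict.getD_of_not_contains _ _ (by simpa using h), zero_add]

lemma pv_post (D : PySem.Dict String Int) (hnd : D.keys.Nodup) :
    (match PySem.List.max? (D.items.map (fun x : String × Int => x.2)) (fun x => x) with
     | none => ([] : List String)
     | some themax => PySem.List.sorted
         (List.foldl (fun acc f => if D.getD f 0 == themax then acc ++ [f] else acc) []
           (D.items.map (fun x : String × Int => x.1))) (fun x => x))
    = match PySem.List.max? (D.items.map (fun x : String × Int => x.2)) (fun x => x) with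
      | none => []
      | some m => PySem.List.sorted ((D.items.filter (fun p : String × Int => p.2 == m)).map (fun p : String × Int => p.1)) (fun x => x) := by
  cases h : PySem.List.max? (D.items.map (fun x : String × Int => x.2)) (fun x => x) with
  | none => rfl
  | some m =>
    show PySem.List.sorted _ _ = PySem.List.sorted _ _
    congr 1
    rw [PySem.List.foldl_append_if_eq_filter (fun f => D.getD f 0 == m) (D.items.map (fun x => x.1)) [],
      List.nil_append]
    rw [PySem.Dict.items_eq_map_keys D hnd 0, List.map_map, List.filter_map, List.filter_map,
      List.map_map]
    have hfil : List.filter ((fun f => D.getD f 0 == m) ∘ (fun (x : String × Int) => x.1) ∘ fun k => (k, D.getD k 0)) D.keys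
        = List.filter ((fun (p : String × Int) => p.2 == m) ∘ fun k => (k, D.getD k 0)) D.keys :=
      List.filter_congr (fun k _ => rfl)
    rw [hfil]

lemma pv_range_pairs (l : List (String × Int)) :
    (PySem.List.pyRange 0 (PySem.List.len (l.map (fun p => p.1))) 1).flatMap
        (fun b => ' ' :: PySem.List.pyRepeat ((PySem.List.pyGetD (l.map (fun p => p.1)) b "").toList ++ [' '])
          (PySem.List.pyGetD (l.map (fun p => p.2)) b 0))
      = l.flatMap pvChunk := by
  rw [PySem.List.len_eq, PySem.List.pyRange_one]
  simp only [zero_add, sub_zero, Int.toNat_natCast, List.flatMap_map, PySem.List.pyGetD_natCast,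
    List.length_map]
  exact pv_range_flatMap (fun a b => ' ' :: (List.replicate b.toNat (a.toList ++ [' '])).flatten) "" 0 l

lemma pv_B_fold (ed : List (String × Int)) :
    ed.foldl (fun d p => if 0 < p.2 then (PySem.Str.split₀ p.1).foldl (fun d w => d.insert w (d.getD w 0 + p.2)) d else d) PySem.Dict.empty
      = (ed.flatMap pvPairs).foldl pvBump PySem.Dict.empty := by
  rw [List.foldl_flatMap]
  apply PySem.List.foldl_congr_mem
  intro d p _
  by_cases h : 0 < p.2
  · rw [if_pos h]
    simp only [pvPairs, h, if_true]
    rw [List.foldl_map]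
    rfl
  · rw [if_neg h]
    simp [pvPairs, h]

-- ===== VERDICT (by name: the statement is the Claim_ definition above) =====

theorem compute_most_frequent_spec : Claim_equal_compute_most_frequent := by
  intro dict1 dict2 _ _
  unfold Spec_compute_most_frequent
  simp only [compute_most_frequent, compute_most_frequent_alt]
  simp only [PySem.List.foldl_append_singleton_eq_self, List.nil_append]
  simp only [PySem.List.foldl_append_eq_flatMap, List.nil_append]
  simp only [PySem.Dict.keys, PySem.Dict.values]
  simp only [pv_range_pairs]
  simp only [← List.flatMap_append]
  simp only [pv_split_chunks]
  simp only [pv_A_fold, pv_dicts_core, ← pv_B_fold]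
  refine pv_post _ ?_
  rw [pv_B_fold]
  exact pv_keys_nodup _
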